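-- pv_equiv track=rewrite | github.com/bstriner/inference_rules | inference_rules/dataset.py | relation_map
-- ===== SOURCE A (Python) =====
-- def add_to_map(data, s, r, t):
--     if t not in data[s]:
--         data[s][t] = set()
--     data[s][t].add(r)
--
-- def relation_map(tups, e_k, r_k):
--     forward = {i: {} for i in range(e_k)}
--     backward = {i: {} for i in range(e_k)}
--     for s, r, t in tups:
--         add_to_map(forward, s, r, t)
--         add_to_map(forward, t, r + r_k, s)
--         add_to_map(backward, t, r, s)
--         add_to_map(backward, s, r + r_k, t)
--     return forward, backward
-- ===== SOURCE B (Python) =====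
-- def relation_map(tups, e_k, r_k):
--     # Build only the forward map in one pass, then derive backward as its transpose.
--     forward = {i: {} for i in range(e_k)}
--     for s, r, t in tups:
--         if t not in forward[s]:
--             forward[s][t] = set()
--         forward[s][t].add(r)
--         if s not in forward[t]:
--             forward[t][s] = set()
--         forward[t][s].add(r + r_k)
--     backward = {b: {a: set(forward[a][b]) for a in fwd_b} for b, fwd_b in forward.items()}
--     return forward, backward
-- ===== Notes on version B (the rewrite author's own statement) =====
-- stated objective: alternative
-- what changed: A fills forward and backward dicts simultaneously with four guarded set-inserts per triple; B builds only the forward map in one pass (two inserts per triple) and then derives backward as the transpose of forward in a second pass, copying each relation set.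
import Mathlib
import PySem

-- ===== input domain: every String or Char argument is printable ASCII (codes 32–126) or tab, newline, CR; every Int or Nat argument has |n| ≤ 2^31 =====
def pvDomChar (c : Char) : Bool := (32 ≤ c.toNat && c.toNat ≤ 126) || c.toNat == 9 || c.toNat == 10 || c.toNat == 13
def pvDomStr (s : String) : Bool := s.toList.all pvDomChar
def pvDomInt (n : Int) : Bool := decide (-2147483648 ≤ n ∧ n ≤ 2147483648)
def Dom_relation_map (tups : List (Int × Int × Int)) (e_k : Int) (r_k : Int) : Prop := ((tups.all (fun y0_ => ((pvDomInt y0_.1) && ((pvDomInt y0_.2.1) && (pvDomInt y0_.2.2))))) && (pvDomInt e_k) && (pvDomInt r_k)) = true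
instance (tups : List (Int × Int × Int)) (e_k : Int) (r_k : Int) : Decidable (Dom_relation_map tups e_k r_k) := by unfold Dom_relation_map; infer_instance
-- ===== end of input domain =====

-- B replaces A's four-way symmetric insertion into two dicts by one forward pass plus a
-- transpose pass (alternative decomposition, same exact result on Pre_).

-- ===== PORT A =====
-- add_to_map(data, s, r, t): Python reads data[s] (KeyError when s is absent — excluded by
-- Pre_); under Pre_ the key s is present, so the in-place update of data[s] is exactly
-- `modify s` (the Dict.empty default is never reached), and the guarded
-- 'if t not in data[s]: data[s][t] = set(); data[s][t].add(r)' is exactly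
-- 'modify t' with default empty set: data[s][t] = data[s].get(t, set()) ∪ {r}.
def addToMap (data : PySem.Dict Int (PySem.Dict Int (PySem.Set Int))) (s r t : Int) :
    PySem.Dict Int (PySem.Dict Int (PySem.Set Int)) :=
  data.modify s PySem.Dict.empty
    (fun inner => inner.modify t ([] : PySem.Set Int) (fun st => PySem.Set.add st r))

def relation_map (tups : List (Int × Int × Int)) (e_k : Int) (r_k : Int) :
    (List (Int × List (Int × List Int))) × (List (Int × List (Int × List Int))) :=
  let forward : PySem.Dict Int (PySem.Dict Int (PySem.Set Int)) :=
    (PySem.List.pyRange 0 e_k 1).foldl (fun d i => d.insert i PySem.Dict.empty) PySem.Dict.empty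
  let backward : PySem.Dict Int (PySem.Dict Int (PySem.Set Int)) :=
    (PySem.List.pyRange 0 e_k 1).foldl (fun d i => d.insert i PySem.Dict.empty) PySem.Dict.empty
  -- for s, r, t in tups: the four add_to_map calls, in order (fb.1 = forward, fb.2 = backward)
  let fb := tups.foldl
    (fun fb p =>
      (addToMap (addToMap fb.1 p.1 p.2.1 p.2.2) p.2.2 (p.2.1 + r_k) p.1,
       addToMap (addToMap fb.2 p.2.2 p.2.1 p.1) p.1 (p.2.1 + r_k) p.2.2))
    (forward, backward)
  (fb.1.items.map (fun p => (p.1, p.2.items)), fb.2.items.map (fun p => (p.1, p.2.items)))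

-- ===== PORT B =====
-- Source B: one pass building only `forward` (same guarded inserts, inlined), then
-- `backward = {b: {a: set(forward[a][b]) for a in fwd_b} for b, fwd_b in forward.items()}`.
-- forward[a][b]: under Pre_ both keys are present (KeyError is excluded by Pre_), so the
-- lookups are getD; set(...) copies a set, which on the immutable list model is the list itself.
def relation_map_alt (tups : List (Int × Int × Int)) (e_k : Int) (r_k : Int) :
    (List (Int × List (Int × List Int))) × (List (Int × List (Int × List Int))) :=
  let forward : PySem.Dict Int (PySem.Dict Int (PySem.Set Int)) :=
    tups.foldl
      (fun f p =>
        let f1 := f.modify p.1 PySem.Dict.empty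
          (fun inner => inner.modify p.2.2 ([] : PySem.Set Int) (fun st => PySem.Set.add st p.2.1));
        f1.modify p.2.2 PySem.Dict.empty
          (fun inner => inner.modify p.1 ([] : PySem.Set Int) (fun st => PySem.Set.add st (p.2.1 + r_k))))
      ((PySem.List.pyRange 0 e_k 1).foldl (fun d i => d.insert i PySem.Dict.empty) PySem.Dict.empty)
  let backward : List (Int × List (Int × List Int)) :=
    forward.items.map (fun p =>
      (p.1, p.2.keys.map (fun a =>
        (a, ((forward.getD a PySem.Dict.empty).getD p.1 ([] : PySem.Set Int) : List Int)))))
  (forward.items.map (fun p => (p.1, p.2.items)), backward)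

-- ===== PRECONDITION & SPEC =====
-- Pre_ excludes exactly the inputs on which A raises KeyError: a triple whose subject or
-- object entity is outside range(e_k).
def Pre_relation_map (tups : List (Int × Int × Int)) (e_k : Int) (r_k : Int) : Prop :=
  ∀ p ∈ tups, (0 ≤ p.1 ∧ p.1 < e_k) ∧ (0 ≤ p.2.2 ∧ p.2.2 < e_k)
instance (tups : List (Int × Int × Int)) (e_k : Int) (r_k : Int) : Decidable (Pre_relation_map tups e_k r_k) := by unfold Pre_relation_map; infer_instance
def pvWitness_relation_map : (List (Int × Int × Int)) × Int × Int := ([(0, 5, 1), (1, 2, 1)], 2, 10)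

def Spec_relation_map (tups : List (Int × Int × Int)) (e_k : Int) (r_k : Int) (out : (List (Int × List (Int × List Int))) × (List (Int × List (Int × List Int)))) : Prop := out = relation_map_alt tups e_k r_k
instance (tups : List (Int × Int × Int)) (e_k : Int) (r_k : Int) (out : (List (Int × List (Int × List Int))) × (List (Int × List (Int × List Int)))) : Decidable (Spec_relation_map tups e_k r_k out) := by unfold Spec_relation_map; infer_instance

-- ===== CLAIM (what is proved, stated in full; the proofs are below) =====
def Claim_equal_relation_map : Prop := ∀ (tups : List (Int × Int × Int)) (e_k : Int) (r_k : Int), Dom_relation_map tups e_k r_k → Pre_relation_map tups e_k r_k → Spec_relation_map tups e_k r_k (relation_map tups e_k r_k)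

-- ===== LEMMAS AND PROOFS =====

-- abbreviation for the nested dict type (proof-side only)
abbrev RMD : Type := PySem.Dict Int (PySem.Dict Int (PySem.Set Int))

-- the initial map {i: {} for i in range(e_k)}
def rmInit (e_k : Int) : RMD :=
  (PySem.List.pyRange 0 e_k 1).foldl (fun d i => d.insert i PySem.Dict.empty) PySem.Dict.empty

-- the two components of A's loop body
def stepF (r_k : Int) (f : RMD) (p : Int × Int × Int) : RMD :=
  addToMap (addToMap f p.1 p.2.1 p.2.2) p.2.2 (p.2.1 + r_k) p.1
def stepB (r_k : Int) (b : RMD) (p : Int × Int × Int) : RMD :=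
  addToMap (addToMap b p.2.2 p.2.1 p.1) p.1 (p.2.1 + r_k) p.2.2

-- loop invariant: backward is pointwise the transpose of forward
def RMInv (e_k : Int) (f b : RMD) : Prop :=
  f.keys = PySem.List.pyRange 0 e_k 1 ∧
  b.keys = f.keys ∧
  (∀ x : Int, (f.getD x PySem.Dict.empty).keys.Nodup) ∧
  (∀ x : Int, (b.getD x PySem.Dict.empty).keys = (f.getD x PySem.Dict.empty).keys) ∧
  (∀ x a : Int, (b.getD x PySem.Dict.empty).getD a ([] : PySem.Set Int)
              = (f.getD a PySem.Dict.empty).getD x ([] : PySem.Set Int))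

lemma keysIns {ν : Type} (d : PySem.Dict Int ν) (k : Int) (v : ν) :
    (d.insert k v).keys = if k ∈ d.keys then d.keys else d.keys ++ [k] := by
  cases hc : d.contains k with
  | true =>
    rw [PySem.Dict.keys_insert_of_contains d v hc, if_pos]
    rw [PySem.Dict.contains_eq_decide_mem_keys] at hc; exact of_decide_eq_true hc
  | false =>
    rw [PySem.Dict.keys_insert_of_not_contains d v hc, if_neg]
    rw [PySem.Dict.contains_eq_decide_mem_keys] at hc; exact of_decide_eq_false hc

lemma foldl_insert_empty_getD (l : List Int) (d : RMD)
    (h : ∀ x : Int, d.getD x PySem.Dict.empty = PySem.Dict.empty) (x : Int) :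
    (l.foldl (fun d i => d.insert i PySem.Dict.empty) d).getD x PySem.Dict.empty
      = PySem.Dict.empty := by
  induction l generalizing d with
  | nil => exact h x
  | cons i l ih =>
    simp only [List.foldl_cons]
    refine ih _ (fun y => ?_)
    rw [PySem.Dict.getD_insert]
    split_ifs with hy
    · rfl
    · exact h y

lemma rmInit_getD (e_k x : Int) : (rmInit e_k).getD x PySem.Dict.empty = PySem.Dict.empty :=
  foldl_insert_empty_getD _ _ (fun _ => by simp [pysem]) x

lemma rmInit_keys (e_k : Int) : (rmInit e_k).keys = PySem.List.pyRange 0 e_k 1 := by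
  unfold rmInit
  rw [PySem.Dict.keys_foldl_insert]
  simp [pysem, PySem.List.nodup_pyRange_one 0 e_k]

lemma inv_init (e_k : Int) : RMInv e_k (rmInit e_k) (rmInit e_k) := by
  refine ⟨rmInit_keys e_k, rfl, ?_, fun x => rfl, ?_⟩
  · intro x; simp [rmInit_getD, pysem]
  · intro x a; simp [rmInit_getD, pysem]

set_option maxRecDepth 16384 in
lemma inv_step (e_k r_k : Int) (f b : RMD)
    (h : RMInv e_k f b) (p : Int × Int × Int)
    (hs : 0 ≤ p.1 ∧ p.1 < e_k) (ht : 0 ≤ p.2.2 ∧ p.2.2 < e_k) :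
    RMInv e_k (stepF r_k f p) (stepB r_k b p) := by
  obtain ⟨s, r, t⟩ := p
  obtain ⟨hfk, hbfk, hnd, hkeq, hget⟩ := h
  simp only at hs ht
  have hsf : f.contains s = true := by
    rw [PySem.Dict.contains_eq_decide_mem_keys, hfk]
    simp [PySem.List.mem_pyRange_one]; omega
  have htf : f.contains t = true := by
    rw [PySem.Dict.contains_eq_decide_mem_keys, hfk]
    simp [PySem.List.mem_pyRange_one]; omega
  have hsb : b.contains s = true := by
    rw [PySem.Dict.contains_eq_decide_mem_keys, hbfk, hfk]
    simp [PySem.List.mem_pyRange_one]; omega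
  have htb : b.contains t = true := by
    rw [PySem.Dict.contains_eq_decide_mem_keys, hbfk, hfk]
    simp [PySem.List.mem_pyRange_one]; omega
  have hkF : (stepF r_k f (s, r, t)).keys = f.keys := by
    simp only [stepF, addToMap, PySem.Dict.modify]
    rw [PySem.Dict.keys_insert_of_contains _ _ (by simp [PySem.Dict.contains_insert, htf]),
        PySem.Dict.keys_insert_of_contains _ _ hsf]
  have hkB : (stepB r_k b (s, r, t)).keys = b.keys := by
    simp only [stepB, addToMap, PySem.Dict.modify]
    rw [PySem.Dict.keys_insert_of_contains _ _ (by simp [PySem.Dict.contains_insert, hsb]),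
        PySem.Dict.keys_insert_of_contains _ _ htb]
  refine ⟨hkF.trans hfk, (hkB.trans hbfk).trans hkF.symm, ?_, ?_, ?_⟩
  · intro x
    simp only [stepF, addToMap, PySem.Dict.modify, PySem.Dict.getD_insert]
    split_ifs <;> (repeat' apply PySem.Dict.nodup_keys_insert) <;> exact hnd _
  · intro x
    simp only [stepB, stepF, addToMap, PySem.Dict.modify, PySem.Dict.getD_insert]
    rcases eq_or_ne x s with hxs | hxs <;> rcases eq_or_ne x t with hxt | hxt
    · simp [hxs, show t = s by omega, keysIns, PySem.Dict.mem_keys_insert, hkeq]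
    · simp [hxs, show ¬ x = t by omega, show ¬ s = t by omega, show ¬ t = s by omega,
        keysIns, PySem.Dict.mem_keys_insert, hkeq]
    · simp [hxt, show ¬ x = s by omega, show ¬ s = t by omega, show ¬ t = s by omega,
        keysIns, PySem.Dict.mem_keys_insert, hkeq]
    · simp [hxs, hxt, keysIns, PySem.Dict.mem_keys_insert, hkeq]
  · intro x a
    simp only [stepB, stepF, addToMap, PySem.Dict.modify, PySem.Dict.getD_insert]
    rcases eq_or_ne x s with hxs | hxs <;> rcases eq_or_ne x t with hxt | hxt <;>
      rcases eq_or_ne a s with has | has <;> rcases eq_or_ne a t with hat | hat <;>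
      rcases eq_or_ne s t with hst | hst <;>
      first
        | omega
        | simp [hxs, hxt, has, hat, show t = s by omega, PySem.Dict.getD_insert, hget]
        | simp [hxs, hxt, has, hat, hst, show t ≠ s by omega, PySem.Dict.getD_insert, hget]
        | simp [hxs, hxt, has, hat, hst, PySem.Dict.getD_insert, hget]
        | simp_all [PySem.Dict.getD_insert, hget]

lemma inv_fold (e_k r_k : Int) (l : List (Int × Int × Int)) (f b : RMD)
    (h : RMInv e_k f b) (hpre : ∀ p ∈ l, (0 ≤ p.1 ∧ p.1 < e_k) ∧ (0 ≤ p.2.2 ∧ p.2.2 < e_k)) :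
    RMInv e_k (l.foldl (stepF r_k) f) (l.foldl (stepB r_k) b) := by
  induction l generalizing f b with
  | nil => exact h
  | cons p l ih =>
    simp only [List.foldl_cons]
    exact ih _ _ (inv_step e_k r_k f b h p (hpre p (by simp)).1 (hpre p (by simp)).2)
      (fun q hq => hpre q (by simp [hq]))

lemma foldA (r_k : Int) (l : List (Int × Int × Int)) (fb0 : RMD × RMD) :
    List.foldl (fun fb p =>
        (addToMap (addToMap fb.1 p.1 p.2.1 p.2.2) p.2.2 (p.2.1 + r_k) p.1,
         addToMap (addToMap fb.2 p.2.2 p.2.1 p.1) p.1 (p.2.1 + r_k) p.2.2)) fb0 l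
      = (l.foldl (stepF r_k) fb0.1, l.foldl (stepB r_k) fb0.2) := by
  obtain ⟨a, b⟩ := fb0
  exact PySem.List.foldl_prod_mk (stepF r_k) (stepB r_k) l a b

lemma relation_map_eq (tups : List (Int × Int × Int)) (e_k r_k : Int) :
    relation_map tups e_k r_k =
      ((tups.foldl (stepF r_k) (rmInit e_k)).items.map (fun p => (p.1, p.2.items)),
       (tups.foldl (stepB r_k) (rmInit e_k)).items.map (fun p => (p.1, p.2.items))) := by
  simp only [relation_map, foldA]
  rfl

lemma relation_map_alt_eq (tups : List (Int × Int × Int)) (e_k r_k : Int) :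
    relation_map_alt tups e_k r_k =
      ((tups.foldl (stepF r_k) (rmInit e_k)).items.map (fun p => (p.1, p.2.items)),
       (tups.foldl (stepF r_k) (rmInit e_k)).items.map (fun p =>
         (p.1, p.2.keys.map (fun a =>
           (a, ((tups.foldl (stepF r_k) (rmInit e_k)).getD a PySem.Dict.empty).getD p.1
                 ([] : PySem.Set Int)))))) := rfl

-- ===== VERDICT (by name: the statement is the Claim_ definition above) =====
theorem relation_map_spec : Claim_equal_relation_map := by
  intro tups e_k r_k _hdom hpre
  unfold Spec_relation_map
  obtain ⟨hfk, hbfk, hnd, hkeq, hget⟩ :=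
    inv_fold e_k r_k tups (rmInit e_k) (rmInit e_k) (inv_init e_k) hpre
  rw [relation_map_eq, relation_map_alt_eq]
  have hndf : (tups.foldl (stepF r_k) (rmInit e_k)).keys.Nodup := by
    rw [hfk]; exact PySem.List.nodup_pyRange_one 0 e_k
  have hndb : (tups.foldl (stepB r_k) (rmInit e_k)).keys.Nodup := by
    rw [hbfk]; exact hndf
  refine congrArg _ ?_
  rw [PySem.Dict.items_eq_map_keys _ hndb PySem.Dict.empty,
      PySem.Dict.items_eq_map_keys _ hndf PySem.Dict.empty,
      List.map_map, List.map_map, hbfk]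
  refine List.map_congr_left (fun k _hk => ?_)
  simp only [Function.comp]
  refine congrArg _ ?_
  rw [PySem.Dict.items_eq_map_keys _ (by rw [hkeq]; exact hnd k) ([] : PySem.Set Int), hkeq]
  exact List.map_congr_left (fun a _ha => by rw [hget])
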